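-- pv_equiv track=rewrite | github.com/error-wtf/ssz-paper-plots | document_all_plots.py | generate_use_cases
-- ===== SOURCE A (Python) =====
-- def generate_use_cases(info):
--     """Generate use cases section"""
--     topics = info['physics_topics']
--     uses = []
--
--     if any(t in topics for t in ['ppn', 'shadow', 'qnm', 'energy']):
--         uses.extend([
--             "Paper figures for observational predictions",
--             "Comparison with experimental constraints"
--         ])
--
--     if 'validation' in topics or 'eso' in topics:
--         uses.extend([
--             "Validation documentation",
--             "Data quality assessment"
--         ])
--
--     if any(t in topics for t in ['g79', 'temperature']):
--         uses.extend([
--             "Nebula analysis application",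
--             "Temperature structure interpretation"
--         ])
--
--     if 'phi' in topics or 'regime' in topics:
--         uses.extend([
--             "Statistical analysis visualization",
--             "Performance assessment"
--         ])
--
--     uses.extend([
--         "Educational material",
--         "Presentation graphics"
--     ])
--
--     return uses
-- ===== SOURCE B (Python) =====
-- _GROUP_OF = {
--     'ppn': 0, 'shadow': 0, 'qnm': 0, 'energy': 0,
--     'validation': 1, 'eso': 1,
--     'g79': 2, 'temperature': 2,
--     'phi': 3, 'regime': 3,
-- }
--
-- _MSGS = [
--     ["Paper figures for observational predictions",
--      "Comparison with experimental constraints"],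
--     ["Validation documentation",
--      "Data quality assessment"],
--     ["Nebula analysis application",
--      "Temperature structure interpretation"],
--     ["Statistical analysis visualization",
--      "Performance assessment"],
-- ]
--
--
-- def generate_use_cases(info):
--     """Generate use cases section (inverted index: one pass over topics)"""
--     hit = [False] * 4
--     for t in info['physics_topics']:
--         g = _GROUP_OF.get(t)
--         if g is not None:
--             hit[g] = True
--     uses = []
--     for g in range(4):
--         if hit[g]:
--             uses += _MSGS[g]
--     uses += ["Educational material", "Presentation graphics"]
--     return uses
-- ===== Notes on version B (the rewrite author's own statement) =====
-- stated objective: alternative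
-- what changed: Inverted the traversal: instead of testing each of the four trigger lists against the topics, B makes one pass over the topics with an inverted topic-to-group index setting four hit flags, then emits the message blocks for the flagged groups in order.
import Mathlib
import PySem

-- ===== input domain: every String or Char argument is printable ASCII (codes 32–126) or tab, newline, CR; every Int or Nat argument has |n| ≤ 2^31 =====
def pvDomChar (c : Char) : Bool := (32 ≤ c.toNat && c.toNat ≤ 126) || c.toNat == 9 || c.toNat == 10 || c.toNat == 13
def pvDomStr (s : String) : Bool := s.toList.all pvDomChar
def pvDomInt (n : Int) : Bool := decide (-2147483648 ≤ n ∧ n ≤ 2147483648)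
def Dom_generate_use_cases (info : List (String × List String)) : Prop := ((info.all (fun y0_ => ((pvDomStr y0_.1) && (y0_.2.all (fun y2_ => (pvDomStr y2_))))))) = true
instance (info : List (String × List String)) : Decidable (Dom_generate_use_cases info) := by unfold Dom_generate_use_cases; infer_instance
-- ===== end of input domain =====

-- B inverts the traversal: one pass over the topics with a topic→group index setting hit flags, then the flagged message blocks are emitted in order (alternative decomposition, same cost).

-- ===== PORT A =====
def generate_use_cases (info : List (String × List String)) : List String :=
  let topics := ((PySem.Dict.mk info).get? "physics_topics").getD []
  let uses : List String := []
  let uses := if ["ppn", "shadow", "qnm", "energy"].any (fun t => topics.contains t) then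
      uses ++ ["Paper figures for observational predictions",
               "Comparison with experimental constraints"] else uses
  let uses := if topics.contains "validation" || topics.contains "eso" then
      uses ++ ["Validation documentation",
               "Data quality assessment"] else uses
  let uses := if ["g79", "temperature"].any (fun t => topics.contains t) then
      uses ++ ["Nebula analysis application",
               "Temperature structure interpretation"] else uses
  let uses := if topics.contains "phi" || topics.contains "regime" then
      uses ++ ["Statistical analysis visualization",
               "Performance assessment"] else uses
  uses ++ ["Educational material", "Presentation graphics"]

-- ===== PORT B =====
-- the inverted index _GROUP_OF of Source B
def pvGroupOf : PySem.Dict String Int :=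
  PySem.Dict.mk [("ppn", 0), ("shadow", 0), ("qnm", 0), ("energy", 0),
                 ("validation", 1), ("eso", 1),
                 ("g79", 2), ("temperature", 2),
                 ("phi", 3), ("regime", 3)]

-- the _MSGS table of Source B
def pvMsgs : List (List String) :=
  [ ["Paper figures for observational predictions",
     "Comparison with experimental constraints"],
    ["Validation documentation",
     "Data quality assessment"],
    ["Nebula analysis application",
     "Temperature structure interpretation"],
    ["Statistical analysis visualization",
     "Performance assessment"] ]

-- one step of Source B's topic loop: g = _GROUP_OF.get(t); if g is not None: hit[g] = True
def pvStep (h : Bool × Bool × Bool × Bool) (t : String) : Bool × Bool × Bool × Bool :=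
  match pvGroupOf.get? t with
  | some 0 => (true, h.2.1, h.2.2.1, h.2.2.2)
  | some 1 => (h.1, true, h.2.2.1, h.2.2.2)
  | some 2 => (h.1, h.2.1, true, h.2.2.2)
  | some 3 => (h.1, h.2.1, h.2.2.1, true)
  | _ => h

def pvHitAt (h : Bool × Bool × Bool × Bool) (g : Int) : Bool :=
  if g = 0 then h.1 else if g = 1 then h.2.1 else if g = 2 then h.2.2.1 else h.2.2.2

def generate_use_cases_alt (info : List (String × List String)) : List String :=
  let topics := ((PySem.Dict.mk info).get? "physics_topics").getD []
  let hit := topics.foldl pvStep (false, false, false, false)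
  let uses := (PySem.List.pyRange 0 4 1).foldl
    (fun acc g => if pvHitAt hit g then acc ++ (PySem.List.pyGet? pvMsgs g).getD [] else acc) []
  uses ++ ["Educational material", "Presentation graphics"]

-- ===== PRECONDITION & SPEC =====
-- Pre_ excludes exactly the dicts without a 'physics_topics' key, on which A raises KeyError.
def Pre_generate_use_cases (info : List (String × List String)) : Prop :=
  ((PySem.Dict.mk info).get? "physics_topics").isSome = true
instance (info : List (String × List String)) : Decidable (Pre_generate_use_cases info) := by unfold Pre_generate_use_cases; infer_instance
def pvWitness_generate_use_cases : (List (String × List String)) := [("physics_topics", ["ppn", "eso"])]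
def Spec_generate_use_cases (info : List (String × List String)) (out : List String) : Prop := out = generate_use_cases_alt info
instance (info : List (String × List String)) (out : List String) : Decidable (Spec_generate_use_cases info out) := by unfold Spec_generate_use_cases; infer_instance

-- ===== CLAIM =====
def Claim_equal_generate_use_cases : Prop := ∀ (info : List (String × List String)), Dom_generate_use_cases info → Pre_generate_use_cases info → Spec_generate_use_cases info (generate_use_cases info)

-- ===== LEMMAS AND PROOFS =====

-- the fold over topics computes, component-wise, the 'some topic maps to group g' tests
lemma fold_hits (topics : List String) (h : Bool × Bool × Bool × Bool) :
    topics.foldl pvStep h =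
      (h.1 || topics.any (fun t => pvGroupOf.get? t == some 0),
       h.2.1 || topics.any (fun t => pvGroupOf.get? t == some 1),
       h.2.2.1 || topics.any (fun t => pvGroupOf.get? t == some 2),
       h.2.2.2 || topics.any (fun t => pvGroupOf.get? t == some 3)) := by
  induction topics generalizing h with
  | nil => simp
  | cons t ts ih =>
    simp only [List.foldl_cons, List.any_cons, ih]
    unfold pvStep
    rcases hg : pvGroupOf.get? t with _ | v
    · simp [hg]
    · by_cases h0 : v = 0
      · subst h0; simp [hg]
      · by_cases h1 : v = 1
        · subst h1; simp [hg]
        · by_cases h2 : v = 2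
          · subst h2; simp [hg]
          · by_cases h3 : v = 3
            · subst h3; simp [hg, h0, h1, h2]
            · have hm : (match (some v : Option Int) with
                | some 0 => (true, h.2.1, h.2.2.1, h.2.2.2)
                | some 1 => (h.1, true, h.2.2.1, h.2.2.2)
                | some 2 => (h.1, h.2.1, true, h.2.2.2)
                | some 3 => (h.1, h.2.1, h.2.2.1, true)
                | _ => h) = h := by
                rcases h with ⟨a, b, c, d⟩
                split <;> simp_all
              rw [hm]
              have e0 : ((some v : Option Int) == some 0) = false := beq_eq_false_iff_ne.mpr (by simp [h0])
              have e1 : ((some v : Option Int) == some 1) = false := beq_eq_false_iff_ne.mpr (by simp [h1])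
              have e2 : ((some v : Option Int) == some 2) = false := beq_eq_false_iff_ne.mpr (by simp [h2])
              have e3 : ((some v : Option Int) == some 3) = false := beq_eq_false_iff_ne.mpr (by simp [h3])
              rw [e0, e1, e2, e3]
              simp

-- the inverted index, read off as an if-chain over the ten keys
lemma get?_cases (t : String) :
    pvGroupOf.get? t =
      if t = "ppn" then some 0 else if t = "shadow" then some 0 else if t = "qnm" then some 0
      else if t = "energy" then some 0 else if t = "validation" then some 1 else if t = "eso" then some 1
      else if t = "g79" then some 2 else if t = "temperature" then some 2 else if t = "phi" then some 3
      else if t = "regime" then some 3 else none := by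
  split_ifs with a1 a2 a3 a4 a5 a6 a7 a8 a9 a10 <;>
    simp_all [pvGroupOf, PySem.Dict.get?, List.find?]
  simp [beq_eq_false_iff_ne.mpr (Ne.symm a1), beq_eq_false_iff_ne.mpr (Ne.symm a2),
    beq_eq_false_iff_ne.mpr (Ne.symm a3), beq_eq_false_iff_ne.mpr (Ne.symm a4),
    beq_eq_false_iff_ne.mpr (Ne.symm a5), beq_eq_false_iff_ne.mpr (Ne.symm a6),
    beq_eq_false_iff_ne.mpr (Ne.symm a7), beq_eq_false_iff_ne.mpr (Ne.symm a8),
    beq_eq_false_iff_ne.mpr (Ne.symm a9), beq_eq_false_iff_ne.mpr (Ne.symm a10)]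

-- B's 'some topic maps to group g' test equals A's membership scan, for each group
lemma grp0 (topics : List String) :
    topics.any (fun t => pvGroupOf.get? t == some 0)
      = ["ppn", "shadow", "qnm", "energy"].any (fun t => topics.contains t) := by
  rw [Bool.eq_iff_iff]
  simp only [get?_cases, List.any_eq_true, List.contains_eq_mem, decide_eq_true_eq,
    beq_iff_eq, List.mem_cons, List.not_mem_nil, or_false]
  constructor
  · rintro ⟨t, ht, he⟩
    split_ifs at he <;> simp_all
  · rintro ⟨t, hc, ht⟩
    refine ⟨t, ht, ?_⟩
    rcases hc with h | h | h | h <;> subst h <;> simp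

lemma grp1 (topics : List String) :
    topics.any (fun t => pvGroupOf.get? t == some 1)
      = (topics.contains "validation" || topics.contains "eso") := by
  rw [Bool.eq_iff_iff]
  simp only [get?_cases, List.any_eq_true, List.contains_eq_mem, decide_eq_true_eq,
    beq_iff_eq, Bool.or_eq_true]
  constructor
  · rintro ⟨t, ht, he⟩
    split_ifs at he <;> simp_all
  · rintro (h | h) <;> exact ⟨_, h, by simp⟩

lemma grp2 (topics : List String) :
    topics.any (fun t => pvGroupOf.get? t == some 2)
      = ["g79", "temperature"].any (fun t => topics.contains t) := by
  rw [Bool.eq_iff_iff]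
  simp only [get?_cases, List.any_eq_true, List.contains_eq_mem, decide_eq_true_eq,
    beq_iff_eq, List.mem_cons, List.not_mem_nil, or_false]
  constructor
  · rintro ⟨t, ht, he⟩
    split_ifs at he <;> simp_all
  · rintro ⟨t, hc, ht⟩
    refine ⟨t, ht, ?_⟩
    rcases hc with h | h <;> subst h <;> simp

lemma grp3 (topics : List String) :
    topics.any (fun t => pvGroupOf.get? t == some 3)
      = (topics.contains "phi" || topics.contains "regime") := by
  rw [Bool.eq_iff_iff]
  simp only [get?_cases, List.any_eq_true, List.contains_eq_mem, decide_eq_true_eq,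
    beq_iff_eq, Bool.or_eq_true]
  constructor
  · rintro ⟨t, ht, he⟩
    split_ifs at he <;> simp_all
  · rintro (h | h) <;> exact ⟨_, h, by simp⟩

-- ===== VERDICT =====
theorem generate_use_cases_spec : Claim_equal_generate_use_cases := by
  intro info _ _
  unfold Spec_generate_use_cases generate_use_cases generate_use_cases_alt
  simp only [fold_hits, Bool.false_or, grp0, grp1, grp2, grp3,
    show PySem.List.pyRange 0 4 1 = [0, 1, 2, 3] from by decide,
    List.foldl, pvHitAt, pvMsgs]
  norm_num [PySem.List.pyGet?, PySem.List.pyIdx?]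
  split_ifs <;> simp
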